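-- pv_equiv track=rewrite | github.com/kdraggoo/Etsy-Automation | recipe_automation_v2.py | generate_recipe_title
-- ===== SOURCE A (Python) =====
-- def generate_recipe_title(ingredients):
--     """Generate a recipe title based on ingredients"""
--     if not ingredients:
--         return "Vintage Family Recipe"
--
--     # Look for key ingredients to determine recipe type
--     ingredient_text = ' '.join(ingredients).lower()
--
--     if any(word in ingredient_text for word in ['chocolate', 'cocoa']):
--         if any(word in ingredient_text for word in ['chip', 'chips']):
--             return "Vintage Chocolate Chip Cookies"
--         else:
--             return "Vintage Chocolate Cake"
--     elif any(word in ingredient_text for word in ['apple', 'apples']):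
--         return "Vintage Apple Pie"
--     elif any(word in ingredient_text for word in ['banana', 'bananas']):
--         return "Vintage Banana Bread"
--     elif any(word in ingredient_text for word in ['pumpkin']):
--         return "Vintage Pumpkin Bread"
--     elif any(word in ingredient_text for word in ['brownie', 'brownies']):
--         return "Vintage Brownies"
--     elif any(word in ingredient_text for word in ['cookie', 'cookies']):
--         return "Vintage Sugar Cookies"
--     elif any(word in ingredient_text for word in ['cake', 'cakes']):
--         return "Vintage Layer Cake"
--     elif any(word in ingredient_text for word in ['pie', 'pies']):
--         return "Vintage Fruit Pie"
--     else:
--         return "Vintage Family Dessert"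
-- ===== SOURCE B (Python) =====
-- # Different algorithm: one left-to-right sweep over the joined text collects
-- # the set of ALL keyword hits (no substring-search primitive, no early exit);
-- # a separate decision stage then maps the collected flags to a title.
-- _KEYWORDS = ('chocolate', 'cocoa', 'chip', 'apple', 'banana', 'pumpkin',
--              'brownie', 'cookie', 'cake', 'pie')
--
--
-- def generate_recipe_title(ingredients):
--     """Generate a recipe title based on ingredients"""
--     if not ingredients:
--         return "Vintage Family Recipe"
--     text = ' '.join(ingredients).lower()
--     found = set()
--     for i in range(len(text)):
--         for kw in _KEYWORDS:
--             if text.startswith(kw, i):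
--                 found.add(kw)
--     if 'chocolate' in found or 'cocoa' in found:
--         return "Vintage Chocolate Chip Cookies" if 'chip' in found else "Vintage Chocolate Cake"
--     if 'apple' in found:
--         return "Vintage Apple Pie"
--     if 'banana' in found:
--         return "Vintage Banana Bread"
--     if 'pumpkin' in found:
--         return "Vintage Pumpkin Bread"
--     if 'brownie' in found:
--         return "Vintage Brownies"
--     if 'cookie' in found:
--         return "Vintage Sugar Cookies"
--     if 'cake' in found:
--         return "Vintage Layer Cake"
--     if 'pie' in found:
--         return "Vintage Fruit Pie"
--     return "Vintage Family Dessert"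
-- ===== Notes on version B (the rewrite author's own statement) =====
-- stated objective: alternative
-- what changed: Instead of A's cascade of early-exit substring searches ('word in text' per branch), B makes a single left-to-right sweep over the joined text collecting the set of all keyword hits (text.startswith(kw, i) at each position), then a separate decision stage maps the collected flag set to a title; redundant plural keywords are dropped since each contains its singular.
import Mathlib
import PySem

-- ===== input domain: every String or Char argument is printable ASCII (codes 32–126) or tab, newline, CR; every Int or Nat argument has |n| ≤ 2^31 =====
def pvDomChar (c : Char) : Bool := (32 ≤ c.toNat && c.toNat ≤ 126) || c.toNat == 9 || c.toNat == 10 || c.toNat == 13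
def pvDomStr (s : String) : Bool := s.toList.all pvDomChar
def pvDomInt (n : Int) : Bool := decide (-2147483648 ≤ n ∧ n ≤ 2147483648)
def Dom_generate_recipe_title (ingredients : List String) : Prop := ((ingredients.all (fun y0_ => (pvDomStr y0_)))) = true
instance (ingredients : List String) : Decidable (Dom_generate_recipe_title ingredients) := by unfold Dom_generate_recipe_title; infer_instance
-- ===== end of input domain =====

-- B replaces A's early-exit cascade of substring searches by one sweep over the text
-- collecting the set of all keyword hits, then a decision stage on the flags (alternative).

-- ===== PORT A =====
def generate_recipe_title (ingredients : List String) : String :=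
  if ingredients = [] then "Vintage Family Recipe"
  else
    let ingredient_text := PySem.Str.lower (PySem.Str.join " " ingredients)
    if ["chocolate", "cocoa"].any (fun w => PySem.Str.isIn w ingredient_text) then
      if ["chip", "chips"].any (fun w => PySem.Str.isIn w ingredient_text) then
        "Vintage Chocolate Chip Cookies"
      else
        "Vintage Chocolate Cake"
    else if ["apple", "apples"].any (fun w => PySem.Str.isIn w ingredient_text) then
      "Vintage Apple Pie"
    else if ["banana", "bananas"].any (fun w => PySem.Str.isIn w ingredient_text) then
      "Vintage Banana Bread"
    else if ["pumpkin"].any (fun w => PySem.Str.isIn w ingredient_text) then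
      "Vintage Pumpkin Bread"
    else if ["brownie", "brownies"].any (fun w => PySem.Str.isIn w ingredient_text) then
      "Vintage Brownies"
    else if ["cookie", "cookies"].any (fun w => PySem.Str.isIn w ingredient_text) then
      "Vintage Sugar Cookies"
    else if ["cake", "cakes"].any (fun w => PySem.Str.isIn w ingredient_text) then
      "Vintage Layer Cake"
    else if ["pie", "pies"].any (fun w => PySem.Str.isIn w ingredient_text) then
      "Vintage Fruit Pie"
    else
      "Vintage Family Dessert"

-- ===== PORT B =====
def pvKeywords : List String :=
  ["chocolate", "cocoa", "chip", "apple", "banana", "pumpkin", "brownie", "cookie", "cake", "pie"]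

-- the inner 'for kw in _KEYWORDS' loop at position i; text.startswith(kw, i) with
-- 0 ≤ i < len(text) is exactly 'kw.toList is a prefix of text[i:]' (PySem.Chars.startswith)
def pvMark (t : List Char) (found : PySem.Set String) (i : Nat) : PySem.Set String :=
  pvKeywords.foldl
    (fun f kw => if PySem.Chars.startswith (t.drop i) kw.toList then PySem.Set.add f kw else f)
    found

def generate_recipe_title_alt (ingredients : List String) : String :=
  if ingredients = [] then "Vintage Family Recipe"
  else
    let text := PySem.Str.lower (PySem.Str.join " " ingredients)
    -- 'for i in range(len(text))' over Nat indices
    let found := (List.range text.toList.length).foldl (pvMark text.toList) PySem.Set.empty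
    if PySem.Set.contains found "chocolate" || PySem.Set.contains found "cocoa" then
      if PySem.Set.contains found "chip" then "Vintage Chocolate Chip Cookies"
      else "Vintage Chocolate Cake"
    else if PySem.Set.contains found "apple" then "Vintage Apple Pie"
    else if PySem.Set.contains found "banana" then "Vintage Banana Bread"
    else if PySem.Set.contains found "pumpkin" then "Vintage Pumpkin Bread"
    else if PySem.Set.contains found "brownie" then "Vintage Brownies"
    else if PySem.Set.contains found "cookie" then "Vintage Sugar Cookies"
    else if PySem.Set.contains found "cake" then "Vintage Layer Cake"
    else if PySem.Set.contains found "pie" then "Vintage Fruit Pie"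
    else "Vintage Family Dessert"

-- ===== PRECONDITION & SPEC =====
def Spec_generate_recipe_title (ingredients : List String) (out : String) : Prop := out = generate_recipe_title_alt ingredients
instance (ingredients : List String) (out : String) : Decidable (Spec_generate_recipe_title ingredients out) := by unfold Spec_generate_recipe_title; infer_instance

-- ===== CLAIM (what is proved, stated in full; the proofs are below) =====
def Claim_equal_generate_recipe_title : Prop := ∀ (ingredients : List String), Dom_generate_recipe_title ingredients → Spec_generate_recipe_title ingredients (generate_recipe_title ingredients)

-- ===== LEMMAS AND PROOFS =====

-- a substring of a keyword is found whenever the keyword is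
theorem pvIsIn_mono (a b t : String) (hab : a.toList <:+: b.toList)
    (h : PySem.Str.isIn b t = true) : PySem.Str.isIn a t = true := by
  rw [PySem.Str.isIn_iff_infix] at h ⊢
  exact hab.trans h

-- 'isIn a || isIn b' collapses to 'isIn a' when a is an infix of b
theorem pvOr_plural (a b t : String) (hab : a.toList <:+: b.toList) :
    (PySem.Str.isIn a t || PySem.Str.isIn b t) = PySem.Str.isIn a t := by
  cases hb : PySem.Str.isIn b t with
  | false => simp
  | true => rw [pvIsIn_mono a b t hab hb]; rfl

-- membership after the inner keyword loop at one position
theorem pv_mem_markAux (t : List Char) (kws : List String) (f : PySem.Set String) (kw : String) :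
    (kw ∈ kws.foldl
      (fun f k => if PySem.Chars.startswith t k.toList then PySem.Set.add f k else f) f) ↔
    kw ∈ f ∨ (kw ∈ kws ∧ kw.toList <+: t) := by
  induction kws generalizing f with
  | nil => simp
  | cons k rest ih =>
      simp only [List.foldl_cons, ih, List.mem_cons]
      by_cases hk : PySem.Chars.startswith t k.toList = true
      · have hpre : k.toList <+: t := (PySem.Chars.startswith_iff t k.toList).mp hk
        simp only [hk, if_true, PySem.Set.mem_add]
        by_cases hkw : kw = k
        · subst hkw; tauto
        · tauto
      · have hpre : ¬ (k.toList <+: t) := fun h =>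
          hk ((PySem.Chars.startswith_iff t k.toList).mpr h)
        simp only [hk, if_false, Bool.false_eq_true]
        by_cases hkw : kw = k
        · subst hkw; tauto
        · tauto

theorem pv_mem_mark (t : List Char) (f : PySem.Set String) (i : Nat) (kw : String) :
    kw ∈ pvMark t f i ↔ kw ∈ f ∨ (kw ∈ pvKeywords ∧ kw.toList <+: t.drop i) :=
  pv_mem_markAux (t.drop i) pvKeywords f kw

-- membership after the outer position sweep
theorem pv_mem_scan (t : List Char) (n : Nat) (f : PySem.Set String) (kw : String) :
    (kw ∈ (List.range n).foldl (pvMark t) f) ↔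
    kw ∈ f ∨ (kw ∈ pvKeywords ∧ ∃ i < n, kw.toList <+: t.drop i) := by
  induction n with
  | zero => simp
  | succ n ih =>
      rw [List.range_succ, List.foldl_append, List.foldl_cons, List.foldl_nil,
        pv_mem_mark, ih]
      constructor
      · rintro ((h | ⟨h1, h2⟩) | ⟨h1, h2⟩)
        · exact Or.inl h
        · exact Or.inr ⟨h1, by rcases h2 with ⟨i, hi, h⟩; exact ⟨i, by omega, h⟩⟩
        · exact Or.inr ⟨h1, n, by omega, h2⟩
      · rintro (h | ⟨h1, i, hi, h⟩)
        · exact Or.inl (Or.inl h)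
        · by_cases hin : i = n
          · subst hin; exact Or.inr ⟨h1, h⟩
          · exact Or.inl (Or.inr ⟨h1, i, by omega, h⟩)

-- the sweep's flag for a (nonempty) keyword equals Python's 'kw in text'
theorem pv_contains_scan (s : String) (kw : String) (hk : kw ∈ pvKeywords)
    (hne : kw.toList ≠ []) :
    PySem.Set.contains
      ((List.range s.toList.length).foldl (pvMark s.toList) PySem.Set.empty) kw
    = PySem.Str.isIn kw s := by
  cases h : PySem.Str.isIn kw s with
  | true =>
      rw [PySem.Str.isIn_eq] at h
      obtain ⟨j, hj⟩ := (PySem.Chars.exists_prefix_drop_iff_isIn kw.toList s.toList).mpr h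
      have hjlt : j < s.toList.length := by
        by_contra hge
        rw [List.drop_eq_nil_of_le (by omega)] at hj
        exact hne (List.prefix_nil.mp hj)
      exact (PySem.Set.contains_iff _ _).mpr ((pv_mem_scan _ _ _ _).mpr (Or.inr ⟨hk, j, hjlt, hj⟩))
  | false =>
      by_contra hc
      have hmem := (PySem.Set.contains_iff _ _).mp (by
        cases hcv : PySem.Set.contains
          ((List.range s.toList.length).foldl (pvMark s.toList) PySem.Set.empty) kw
        · exact absurd hcv hc
        · rfl)
      rcases (pv_mem_scan _ _ _ _).mp hmem with h' | ⟨_, i, _, hp⟩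
      · simp [PySem.Set.empty] at h'
      · have : PySem.Chars.isIn kw.toList s.toList = true :=
          (PySem.Chars.exists_prefix_drop_iff_isIn kw.toList s.toList).mp ⟨i, hp⟩
        rw [PySem.Str.isIn_eq, this] at h
        exact Bool.true_eq_false.mp h

-- ===== VERDICT (by name: the statement is the Claim_ definition above) =====
theorem generate_recipe_title_spec : Claim_equal_generate_recipe_title := by
  intro ingredients _
  unfold Spec_generate_recipe_title generate_recipe_title generate_recipe_title_alt
  by_cases hnil : ingredients = []
  · simp [hnil]
  · simp only [if_neg hnil]
    generalize PySem.Str.lower (PySem.Str.join " " ingredients) = t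
    simp only [List.any_cons, List.any_nil, Bool.or_false,
      pvOr_plural "apple" "apples" t (by decide),
      pvOr_plural "banana" "bananas" t (by decide),
      pvOr_plural "brownie" "brownies" t (by decide),
      pvOr_plural "cookie" "cookies" t (by decide),
      pvOr_plural "cake" "cakes" t (by decide),
      pvOr_plural "pie" "pies" t (by decide),
      pvOr_plural "chip" "chips" t (by decide),
      pv_contains_scan t "chocolate" (by decide) (by decide),
      pv_contains_scan t "cocoa" (by decide) (by decide),
      pv_contains_scan t "chip" (by decide) (by decide),
      pv_contains_scan t "apple" (by decide) (by decide),
      pv_contains_scan t "banana" (by decide) (by decide),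
      pv_contains_scan t "pumpkin" (by decide) (by decide),
      pv_contains_scan t "brownie" (by decide) (by decide),
      pv_contains_scan t "cookie" (by decide) (by decide),
      pv_contains_scan t "cake" (by decide) (by decide),
      pv_contains_scan t "pie" (by decide) (by decide)]
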